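-- pv_equiv track=rewrite | github.com/Jonquil-L/GNN_slp | slp/local_search.py | _reindex_remaining
-- ===== SOURCE A (Python) =====
-- def _reindex_remaining(remaining_gates, num_inputs, start_gate_idx, removed_count):
--     """重新索引删除 removed_count 个门后的剩余门"""
--     old_to_new = {}
--     # 原始门 0..start_gate_idx-1 → 不变
--     for i in range(num_inputs + start_gate_idx):
--         old_to_new[i] = i
--
--     # 被替代的两个门（索引 start_gate_idx 和 start_gate_idx+1）
--     # 新电路在位置 start_gate_idx 有一个新门
--     # 所以原始节点 num_inputs + start_gate_idx → 删除
--     # 原始节点 num_inputs + start_gate_idx + 1 → 删除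
--     # 新节点 num_inputs + start_gate_idx → 新的替代门
--
--     # 新替代门的节点
--     new_replacement_node = num_inputs + start_gate_idx
--
--     # 旧的两个节点映射到新的一个
--     old_node_0 = num_inputs + start_gate_idx
--     old_node_1 = num_inputs + start_gate_idx + 1
--
--     # 后续门的旧节点需要偏移 -1
--     new_circuit = []
--     next_new = new_replacement_node + 1
--
--     for gate_idx, (u, v) in enumerate(remaining_gates):
--         old_gate_idx = start_gate_idx + 2 + gate_idx
--         old_node = num_inputs + old_gate_idx
--
--         # 映射 u
--         if u == old_node_0 or u == old_node_1:
--             # 引用了被合并的两个门之一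
--             # 如果引用 old_node_1（两门合一后的最终结果），映射到新替代门
--             if u == old_node_1:
--                 new_u = new_replacement_node
--             else:
--                 # 引用了中间结果 old_node_0，但它已被删除
--                 return None
--         elif u in old_to_new:
--             new_u = old_to_new[u]
--         else:
--             return None
--
--         # 映射 v
--         if v == old_node_0 or v == old_node_1:
--             if v == old_node_1:
--                 new_v = new_replacement_node
--             else:
--                 return None
--         elif v in old_to_new:
--             new_v = old_to_new[v]
--         else:
--             return None
--
--         new_circuit.append((new_u, new_v))
--         old_to_new[old_node] = next_new
--         next_new += 1
--
--     return new_circuit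
-- ===== SOURCE B (Python) =====
-- def _reindex_remaining(remaining_gates, num_inputs, start_gate_idx, removed_count):
--     """Arithmetic index mapping: no identity dict, one pass over remaining_gates."""
--     n = num_inputs + start_gate_idx  # node of the merged gate / first deleted old node
--
--     def _map(x, hi):
--         if x == n + 1:
--             return n            # final output of the merged pair -> replacement gate
--         if 0 <= x < n:
--             return x            # inputs and earlier gates: unchanged
--         if n + 2 <= x < hi:
--             return x - 1        # later gates already emitted: shift by -1
--         return None
--
--     out = []
--     for idx, (u, v) in enumerate(remaining_gates):
--         hi = n + 2 + idx
--         nu = _map(u, hi)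
--         nv = _map(v, hi)
--         if nu is None or nv is None:
--             return None
--         out.append((nu, nv))
--     return out
-- ===== Notes on version B (the rewrite author's own statement) =====
-- stated objective: faster
-- what changed: Replaces the identity dict built over range(num_inputs+start_gate_idx) and mutated per gate with a closed-form arithmetic mapping, so only the remaining gates are traversed.
import Mathlib
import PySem

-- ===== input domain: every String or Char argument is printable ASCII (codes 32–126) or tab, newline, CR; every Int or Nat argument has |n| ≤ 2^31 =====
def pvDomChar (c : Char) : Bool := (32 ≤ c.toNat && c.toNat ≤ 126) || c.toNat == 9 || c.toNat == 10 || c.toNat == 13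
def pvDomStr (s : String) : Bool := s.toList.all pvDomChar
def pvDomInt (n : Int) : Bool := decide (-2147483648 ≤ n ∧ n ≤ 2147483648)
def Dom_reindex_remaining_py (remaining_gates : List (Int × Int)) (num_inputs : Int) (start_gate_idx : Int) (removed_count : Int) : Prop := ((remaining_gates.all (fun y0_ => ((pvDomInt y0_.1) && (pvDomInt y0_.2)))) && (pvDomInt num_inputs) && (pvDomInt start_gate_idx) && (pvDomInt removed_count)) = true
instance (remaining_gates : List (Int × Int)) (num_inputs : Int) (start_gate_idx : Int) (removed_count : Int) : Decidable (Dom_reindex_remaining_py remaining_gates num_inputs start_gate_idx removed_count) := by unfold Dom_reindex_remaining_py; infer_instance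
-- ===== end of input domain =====

-- B replaces A's identity dict with a closed-form arithmetic index map (one pass over remaining_gates only).

-- ===== PORT A =====
-- the per-gate loop of A: state = (gate_idx, old_to_new dict, next_new, accumulated new_circuit)
def pyALoop (n : Int) : List (Int × Int) → Int → PySem.Dict Int Int → Int → List (Int × Int) → Option (List (Int × Int))
  | [], _, _, _, acc => some acc.reverse
  | (u, v) :: rest, gate_idx, d, next_new, acc =>
    let old_node : Int := n + (2 + gate_idx)          -- num_inputs + (start_gate_idx + 2 + gate_idx)
    -- 映射 u
    let mu : Option Int :=
      if u = n ∨ u = n + 1 then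
        (if u = n + 1 then some n else none)
      else match d.get? u with
        | some y => some y
        | none => none
    match mu with
    | none => none
    | some new_u =>
      -- 映射 v
      let mv : Option Int :=
        if v = n ∨ v = n + 1 then
          (if v = n + 1 then some n else none)
        else match d.get? v with
          | some y => some y
          | none => none
      match mv with
      | none => none
      | some new_v =>
        pyALoop n rest (gate_idx + 1) (d.insert old_node next_new) (next_new + 1) ((new_u, new_v) :: acc)

def reindex_remaining_py (remaining_gates : List (Int × Int)) (num_inputs : Int) (start_gate_idx : Int) (removed_count : Int) : Option (List (Int × Int)) :=
  let old_to_new : PySem.Dict Int Int :=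
    (PySem.List.pyRange 0 (num_inputs + start_gate_idx) 1).foldl (fun d i => d.insert i i) PySem.Dict.empty
  let new_replacement_node := num_inputs + start_gate_idx
  pyALoop new_replacement_node remaining_gates 0 old_to_new (new_replacement_node + 1) []

-- ===== PORT B =====
def altMap (n hi x : Int) : Option Int :=
  if x = n + 1 then some n
  else if 0 ≤ x ∧ x < n then some x
  else if n + 2 ≤ x ∧ x < hi then some (x - 1)
  else none

def altLoop (n : Int) : List (Int × Int) → Int → List (Int × Int) → Option (List (Int × Int))
  | [], _, acc => some acc.reverse
  | (u, v) :: rest, idx, acc =>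
    let hi := n + 2 + idx
    match altMap n hi u, altMap n hi v with
    | some nu, some nv => altLoop n rest (idx + 1) ((nu, nv) :: acc)
    | _, _ => none

def reindex_remaining_py_alt (remaining_gates : List (Int × Int)) (num_inputs : Int) (start_gate_idx : Int) (removed_count : Int) : Option (List (Int × Int)) :=
  altLoop (num_inputs + start_gate_idx) remaining_gates 0 []

-- ===== PRECONDITION & SPEC =====
def Spec_reindex_remaining_py (remaining_gates : List (Int × Int)) (num_inputs : Int) (start_gate_idx : Int) (removed_count : Int) (out : Option (List (Int × Int))) : Prop := out = reindex_remaining_py_alt remaining_gates num_inputs start_gate_idx removed_count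
instance (remaining_gates : List (Int × Int)) (num_inputs : Int) (start_gate_idx : Int) (removed_count : Int) (out : Option (List (Int × Int))) : Decidable (Spec_reindex_remaining_py remaining_gates num_inputs start_gate_idx removed_count out) := by unfold Spec_reindex_remaining_py; infer_instance

-- ===== CLAIM (what is proved, stated in full; the proofs are below) =====
def Claim_equal_reindex_remaining_py : Prop := ∀ (remaining_gates : List (Int × Int)) (num_inputs : Int) (start_gate_idx : Int) (removed_count : Int), Dom_reindex_remaining_py remaining_gates num_inputs start_gate_idx removed_count → Spec_reindex_remaining_py remaining_gates num_inputs start_gate_idx removed_count (reindex_remaining_py remaining_gates num_inputs start_gate_idx removed_count)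

-- ===== LEMMAS AND PROOFS =====

-- closed form of A's dict after the initial range loop and g per-gate insertions
def arith (n g x : Int) : Option Int :=
  if 0 ≤ x ∧ x < n then some x
  else if n + 2 ≤ x ∧ x < n + 2 + g then some (x - 1)
  else none

theorem foldl_insert_id_get? (l : List Int) (d : PySem.Dict Int Int) (x : Int) :
    ((l.foldl (fun d i => d.insert i i) d).get? x) = (if x ∈ l then some x else d.get? x) := by
  induction l generalizing d with
  | nil => simp
  | cons a t ih =>
    simp only [List.foldl_cons, ih, List.mem_cons]
    rw [PySem.Dict.get?_insert]
    by_cases hx : x ∈ t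
    · simp [hx]
    · by_cases hax : x = a <;> simp [hax, hx]

theorem init_dict_arith (n x : Int) :
    (((PySem.List.pyRange 0 n 1).foldl (fun d i => d.insert i i) PySem.Dict.empty).get? x) = arith n 0 x := by
  rw [foldl_insert_id_get?]
  simp only [PySem.List.mem_pyRange_one, arith]
  split_ifs with h1 h2 h3 <;> simp_all <;> omega

theorem insert_arith (n g x next : Int) (d : PySem.Dict Int Int) (hg : 0 ≤ g)
    (hd : ∀ y, d.get? y = arith n g y) :
    (d.insert (n + (2 + g)) (n + 1 + g)).get? x = arith n (g + 1) x := by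
  rw [PySem.Dict.get?_insert]
  by_cases hx : x = n + (2 + g)
  · rw [if_pos hx]
    unfold arith
    split_ifs <;> first | (congr 1; omega) | (exfalso; omega)
  · rw [if_neg hx, hd x]
    unfold arith
    split_ifs <;> first | rfl | (exfalso; omega)

theorem loop_eq (n : Int) (l : List (Int × Int)) (g : Int) (d : PySem.Dict Int Int)
    (acc : List (Int × Int)) (hg : 0 ≤ g) (hd : ∀ y, d.get? y = arith n g y) :
    pyALoop n l g d (n + 1 + g) acc = altLoop n l g acc := by
  induction l generalizing g d acc with
  | nil => rfl
  | cons uv rest ih =>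
    obtain ⟨u, v⟩ := uv
    have hmap : ∀ x : Int,
        (if x = n ∨ x = n + 1 then (if x = n + 1 then some n else none)
         else match d.get? x with | some y => some y | none => none)
        = altMap n (n + 2 + g) x := by
      intro x
      rw [hd x]
      unfold altMap arith
      by_cases h1 : x = n + 1
      · rw [if_pos (Or.inr h1), if_pos h1, if_pos h1]
      · by_cases h0 : x = n
        · rw [if_pos (Or.inl h0), if_neg h1, if_neg h1, if_neg (by omega), if_neg (by omega)]
        · rw [if_neg (by tauto), if_neg h1]
          split_ifs <;> first | rfl | omega
    show pyALoop n ((u, v) :: rest) g d (n + 1 + g) acc = altLoop n ((u, v) :: rest) g acc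
    unfold pyALoop altLoop
    simp only [hmap]
    rcases hu : altMap n (n + 2 + g) u with _ | nu <;>
      rcases hv : altMap n (n + 2 + g) v with _ | nv <;> simp only []
    have : n + 1 + g + 1 = n + 1 + (g + 1) := by ring
    rw [this]
    exact ih (g + 1) _ _ (by omega) (fun y => insert_arith n g y (n + 1 + g) d hg hd)

-- ===== VERDICT (by name: the statement is the Claim_ definition above) =====
theorem reindex_remaining_py_spec : Claim_equal_reindex_remaining_py := by
  intro remaining_gates num_inputs start_gate_idx removed_count _
  show reindex_remaining_py _ _ _ _ = reindex_remaining_py_alt _ _ _ _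
  unfold reindex_remaining_py reindex_remaining_py_alt
  have := loop_eq (num_inputs + start_gate_idx) remaining_gates 0
      ((PySem.List.pyRange 0 (num_inputs + start_gate_idx) 1).foldl (fun d i => d.insert i i) PySem.Dict.empty)
      [] le_rfl (init_dict_arith (num_inputs + start_gate_idx))
  simpa using this
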